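-- pv_equiv track=rewrite | github.com/Yagoor/adventofcode | 13/solution.py | is_mirror_rev
-- ===== SOURCE A (Python) =====
-- def is_mirror_rev(list_to_check, depth):
--     if len(list_to_check) == 1:
--         return None
--
--     mirror = True
--     if len(list_to_check) % 2 == 0:
--         for start, end in zip(list_to_check, reversed(list_to_check)):
--             if start != end:
--                 mirror = False
--                 break
--     else:
--         mirror = False
--
--     if mirror:
--         return tuple(list_to_check)
--
--     return is_mirror_rev(list_to_check[:-1], depth + 1)
-- ===== SOURCE B (Python) =====
-- def is_mirror_rev(list_to_check, depth):
--     if not list_to_check: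
--         return ()
--     n = len(list_to_check)
--     rev = list_to_check[::-1]
--     m = n if n % 2 == 0 else n - 1
--     while m > 1:
--         if list_to_check[:m] == rev[n - m:]:
--             return tuple(list_to_check[:m])
--         m -= 2
--     return None
-- ===== Notes on version B (the rewrite author's own statement) =====
-- stated objective: alternative
-- what changed: Replaced A's recursion (pop last element, re-check each prefix with a zip loop) by a single upfront reversal plus one descending while-loop over even lengths that compares each even prefix against the matching suffix of the reversed list.
import Mathlib
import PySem

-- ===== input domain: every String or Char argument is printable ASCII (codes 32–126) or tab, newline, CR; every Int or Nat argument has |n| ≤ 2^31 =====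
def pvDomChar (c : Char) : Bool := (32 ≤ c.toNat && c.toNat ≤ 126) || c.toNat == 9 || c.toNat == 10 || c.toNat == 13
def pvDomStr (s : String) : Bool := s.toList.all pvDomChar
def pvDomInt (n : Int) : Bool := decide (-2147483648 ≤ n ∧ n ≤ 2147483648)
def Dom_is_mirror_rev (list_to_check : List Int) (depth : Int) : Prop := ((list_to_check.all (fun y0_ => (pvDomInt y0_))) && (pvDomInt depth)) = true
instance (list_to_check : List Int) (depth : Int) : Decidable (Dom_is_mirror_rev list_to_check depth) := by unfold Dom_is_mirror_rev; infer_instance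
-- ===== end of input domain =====

-- B replaces A's recursive pop-the-last-element search by one upfront reversal and a
-- descending loop over even prefix lengths (alternative decomposition, same result).

-- ===== PORT A =====
-- A's inner `for start, end in zip(...)` loop with break
def mirrorLoop : List (Int × Int) → Bool
  | [] => true
  | (s, e) :: rest => if s != e then false else mirrorLoop rest

def is_mirror_rev (list_to_check : List Int) (depth : Int) : Option (List Int) :=
  if list_to_check.length == 1 then none
  else
    if h : (if list_to_check.length % 2 == 0 then
              mirrorLoop (list_to_check.zip list_to_check.reverse) else false) = true then
      some list_to_check
    else
      is_mirror_rev list_to_check.dropLast (depth + 1)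
termination_by list_to_check.length
decreasing_by
  cases list_to_check with
  | nil => simp [mirrorLoop] at h
  | cons a t => simp

-- ===== PORT B =====
-- B's `while m > 1: … ; m -= 2` loop (m stays even, so 1 is never hit from an even start)
def altLoop (l r : List Int) (n : Nat) : Nat → Option (List Int)
  | 0 => none
  | 1 => none
  | (m + 2) =>
    if l.take (m + 2) == r.drop (n - (m + 2)) then some (l.take (m + 2))
    else altLoop l r n m

def is_mirror_rev_alt (list_to_check : List Int) (depth : Int) : Option (List Int) :=
  if list_to_check.isEmpty then some []
  else
    let n := list_to_check.length
    let rev := list_to_check.reverse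
    altLoop list_to_check rev n (if n % 2 == 0 then n else n - 1)

-- ===== PRECONDITION & SPEC =====
def Spec_is_mirror_rev (list_to_check : List Int) (depth : Int) (out : Option (List Int)) : Prop := out = is_mirror_rev_alt list_to_check depth
instance (list_to_check : List Int) (depth : Int) (out : Option (List Int)) : Decidable (Spec_is_mirror_rev list_to_check depth out) := by unfold Spec_is_mirror_rev; infer_instance

-- ===== CLAIM (what is proved, stated in full; the proofs are below) =====
def Claim_equal_is_mirror_rev : Prop := ∀ (list_to_check : List Int) (depth : Int), Dom_is_mirror_rev list_to_check depth → Spec_is_mirror_rev list_to_check depth (is_mirror_rev list_to_check depth)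

-- ===== LEMMAS AND PROOFS =====

-- A's zip loop decides equality of the two equal-length lists
lemma mirrorLoop_zip_eq (x : List Int) : ∀ (y : List Int), x.length = y.length →
    (mirrorLoop (x.zip y) = true ↔ x = y) := by
  induction x with
  | nil => intro y h; cases y <;> simp [mirrorLoop] at h ⊢
  | cons a t ih =>
    intro y h
    cases y with
    | nil => simp at h
    | cons b u =>
      simp only [List.zip_cons_cons, mirrorLoop]
      by_cases hab : a = b
      · subst hab
        simpa using ih u (by simpa using h)
      · simp [hab]

lemma reverse_drop_eq (l : List Int) (m : Nat) (h : m ≤ l.length) :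
    l.reverse.drop (l.length - m) = (l.take m).reverse := by
  rw [List.drop_reverse]
  congr 2
  omega

lemma take_dropLast_eq (l : List Int) (m : Nat) (h : m ≤ l.length - 1) :
    l.dropLast.take m = l.take m := by
  rw [List.dropLast_eq_take, List.take_take]
  congr 1
  omega

-- the search only inspects prefixes of length ≤ m, so dropping the last element is invisible
lemma altLoop_dropLast (l : List Int) : ∀ (m : Nat), m ≤ l.length - 1 →
    altLoop l l.reverse l.length m
      = altLoop l.dropLast l.dropLast.reverse l.dropLast.length m := by
  intro m
  induction m using Nat.strong_induction_on with
  | _ m ih =>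
    match m with
    | 0 => intro _; rfl
    | 1 => intro _; rfl
    | (k + 2) =>
      intro h
      have h1 : k + 2 ≤ l.length := le_trans h (Nat.sub_le _ _)
      have h2 : k + 2 ≤ l.dropLast.length := by
        rw [List.length_dropLast]; exact h
      simp only [altLoop]
      rw [reverse_drop_eq l _ h1, reverse_drop_eq l.dropLast _ h2,
          take_dropLast_eq l _ h, ih k (by omega) (by omega)]

lemma is_mirror_rev_eq_alt : ∀ (n : Nat) (l : List Int) (d : Int), l.length = n →
    is_mirror_rev l d = is_mirror_rev_alt l d := by
  intro n
  induction n using Nat.strong_induction_on with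
  | _ n ih =>
    intro l d hn
    rw [is_mirror_rev]
    match l, hn with
    | [], _ => rfl
    | [a], _ => rfl
    | (a :: b :: t), hn =>
      set L : List Int := a :: b :: t with hL
      have hlen2 : 2 ≤ L.length := by simp [hL]
      have hIH : is_mirror_rev L.dropLast (d + 1) = is_mirror_rev_alt L.dropLast (d + 1) := by
        apply ih (L.length - 1) (by omega) _ _ (by simp)
      have hBL : is_mirror_rev_alt L d
          = altLoop L L.reverse L.length (if L.length % 2 == 0 then L.length else L.length - 1) :=
        rfl
      have hlen1 : L.length ≠ 1 := by omega
      rw [if_neg (by simpa using hlen1)]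
      by_cases hpar : L.length % 2 = 0
      · -- even length
        have hm : mirrorLoop (L.zip L.reverse) = true ↔ L = L.reverse :=
          mirrorLoop_zip_eq L L.reverse (by simp)
        have hpar' : (L.length % 2 == 0) = true := by simpa using hpar
        have hBL' : is_mirror_rev_alt L d = altLoop L L.reverse L.length L.length := by
          rw [hBL, hpar', if_pos rfl]
        have hA : (if (L.length % 2 == 0) = true then mirrorLoop (L.zip L.reverse) else false)
            = mirrorLoop (L.zip L.reverse) := by rw [hpar']; simp
        have hunfold : altLoop L L.reverse L.length L.length
            = if L.take L.length == L.reverse.drop (L.length - L.length)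
              then some (L.take L.length) else altLoop L L.reverse L.length (L.length - 2) :=
          rfl
        by_cases hpal : L = L.reverse
        · rw [dif_pos (by rw [hA]; exact hm.mpr hpal)]
          rw [hBL', hunfold, Nat.sub_self, List.drop_zero, List.take_length,
            if_pos (beq_iff_eq.mpr hpal)]
        · rw [dif_neg (by rw [hA]; exact fun hc => hpal (hm.mp hc))]
          rw [hIH]
          have hBd : is_mirror_rev_alt L.dropLast (d + 1)
              = altLoop L.dropLast L.dropLast.reverse L.dropLast.length (L.length - 2) := by
            have hodd : ((L.length - 1) % 2 == 0) = false := by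
              simp only [beq_eq_false_iff_ne, ne_eq]
              omega
            have hdne : L.dropLast.isEmpty = false := by
              rw [List.isEmpty_eq_false_iff, ← List.length_pos_iff, List.length_dropLast]
              omega
            rw [show is_mirror_rev_alt L.dropLast (d + 1)
                = if L.dropLast.isEmpty then some []
                  else altLoop L.dropLast L.dropLast.reverse L.dropLast.length
                    (if L.dropLast.length % 2 == 0 then L.dropLast.length
                     else L.dropLast.length - 1) from rfl]
            simp only [hdne, Bool.false_eq_true, if_false, List.length_dropLast, hodd]
            rfl
          rw [hBd, ← altLoop_dropLast L (L.length - 2) (by omega), hBL', hunfold,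
            Nat.sub_self, List.drop_zero, List.take_length,
            if_neg (by simpa using hpal)]
      · -- odd length ≥ 3
        have h3 : 3 ≤ L.length := by omega
        rw [dif_neg (by simp [hpar])]
        rw [hIH]
        have hpar' : (L.length % 2 == 0) = false := by simpa using hpar
        have hBL' : is_mirror_rev_alt L d = altLoop L L.reverse L.length (L.length - 1) := by
          rw [hBL, hpar', if_neg (by simp)]
        have hBd : is_mirror_rev_alt L.dropLast (d + 1)
            = altLoop L.dropLast L.dropLast.reverse L.dropLast.length (L.length - 1) := by
          have heven : ((L.length - 1) % 2 == 0) = true := by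
            simp only [beq_iff_eq]
            omega
          have hdne : L.dropLast.isEmpty = false := by
            rw [List.isEmpty_eq_false_iff, ← List.length_pos_iff, List.length_dropLast]
            omega
          rw [show is_mirror_rev_alt L.dropLast (d + 1)
              = if L.dropLast.isEmpty then some []
                else altLoop L.dropLast L.dropLast.reverse L.dropLast.length
                  (if L.dropLast.length % 2 == 0 then L.dropLast.length
                   else L.dropLast.length - 1) from rfl]
          simp only [hdne, Bool.false_eq_true, if_false, List.length_dropLast, heven,
            if_true]
        rw [hBd, ← altLoop_dropLast L (L.length - 1) (by simp), hBL']

-- ===== VERDICT (by name: the statement is the Claim_ definition above) =====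
theorem is_mirror_rev_spec : Claim_equal_is_mirror_rev := by
  intro l d _
  unfold Spec_is_mirror_rev
  exact is_mirror_rev_eq_alt l.length l d rfl
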